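-- pv_equiv track=rewrite | github.com/coolmay/hpcpack-acm | src/Diagnostics/diags-map-reduce-1.0.x.py | mpiPingpongGetGroups
-- ===== SOURCE A (Python) =====
-- def mpiPingpongGetGroups(nodelist):
--     n = len(nodelist)
--     if n <= 2:
--         return [[[nodelist[0], nodelist[-1]]]]
--     groups = []
--     if n%2 == 1:
--         for j in range(0, n):
--             group = []
--             for i in range(1, n//2+1):
--                 group.append([nodelist[(j+i)%n], nodelist[j-i]])
--             groups.append(group)
--     else:
--         groups = mpiPingpongGetGroups(nodelist[1:])
--         for i in range(0, len(groups)):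
--             groups[i].append([nodelist[0], nodelist[i+1]])
--     return groups
-- ===== SOURCE B (Python) =====
-- def mpiPingpongGetGroups(nodelist):
--     n = len(nodelist)
--     if n <= 2:
--         return [[[nodelist[0], nodelist[-1]]]]
--     if n % 2 == 1:
--         return [[[nodelist[(j + i) % n], nodelist[j - i]] for i in range(1, n // 2 + 1)]
--                 for j in range(n)]
--     m = n - 1
--     tail = nodelist[1:]
--     return [[[tail[(j + i) % m], tail[j - i]] for i in range(1, m // 2 + 1)]
--             + [[nodelist[0], nodelist[j + 1]]]
--             for j in range(m)]
-- ===== Notes on version B (the rewrite author's own statement) =====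
-- stated objective: alternative
-- what changed: B removes A's recursive self-call on the even case: it builds the groups directly with nested comprehensions, inlining the odd-length round on the tail and appending the [first, nodelist[j+1]] pair in the same pass, with no recursion and no in-place group mutation.
import Mathlib
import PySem

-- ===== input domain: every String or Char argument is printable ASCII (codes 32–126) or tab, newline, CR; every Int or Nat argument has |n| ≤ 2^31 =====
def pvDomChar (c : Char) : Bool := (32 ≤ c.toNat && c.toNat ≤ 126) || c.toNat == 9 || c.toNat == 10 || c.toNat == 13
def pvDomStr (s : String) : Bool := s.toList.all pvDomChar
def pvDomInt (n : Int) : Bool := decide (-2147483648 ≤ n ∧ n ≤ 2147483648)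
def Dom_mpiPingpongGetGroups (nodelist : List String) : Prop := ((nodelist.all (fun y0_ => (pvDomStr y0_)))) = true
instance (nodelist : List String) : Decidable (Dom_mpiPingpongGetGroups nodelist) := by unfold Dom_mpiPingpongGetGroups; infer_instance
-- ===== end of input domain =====

-- B replaces A's even-case recursion with a direct non-recursive comprehension build (objective: alternative, same cost).

-- ===== PORT A =====
def mpiPingpongGetGroups (nodelist : List String) : List (List (List String)) :=
  let n : Nat := nodelist.length
  if _h : n ≤ 2 then
    [[[PySem.List.pyGetD nodelist 0 "", PySem.List.pyGetD nodelist (-1) ""]]]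
  else if n % 2 = 1 then
    (PySem.List.pyRange 0 (n : Int) 1).foldl (fun groups j =>
      groups ++ [(PySem.List.pyRange 1 (((n / 2 : Nat) : Int) + 1) 1).foldl (fun group i =>
        group ++ [[PySem.List.pyGetD nodelist (PySem.Int.mod (j + i) (n : Int)) "",
                   PySem.List.pyGetD nodelist (j - i) ""]]) []]) []
  else
    let groups := mpiPingpongGetGroups (PySem.List.slice nodelist (some 1) none)
    (PySem.List.pyRange 0 (groups.length : Int) 1).foldl (fun gs i =>
      PySem.List.pySetD gs i (PySem.List.pyGetD gs i [] ++
        [[PySem.List.pyGetD nodelist 0 "", PySem.List.pyGetD nodelist (i + 1) ""]])) groups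
termination_by nodelist.length
decreasing_by
  simp only [PySem.List.slice_from_one, List.length_tail]
  omega

-- ===== PORT B =====
def mpiPingpongGetGroups_alt (nodelist : List String) : List (List (List String)) :=
  let n : Nat := nodelist.length
  if n ≤ 2 then
    [[[PySem.List.pyGetD nodelist 0 "", PySem.List.pyGetD nodelist (-1) ""]]]
  else if n % 2 = 1 then
    (List.range n).map (fun (j : Nat) =>
      (List.range (n / 2)).map (fun (i : Nat) =>
        [PySem.List.pyGetD nodelist (PySem.Int.mod ((j : Int) + ((i : Int) + 1)) (n : Int)) "",
         PySem.List.pyGetD nodelist ((j : Int) - ((i : Int) + 1)) ""]))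
  else
    let m : Nat := n - 1
    let tail : List String := nodelist.tail
    (List.range m).map (fun (j : Nat) =>
      ((List.range (m / 2)).map (fun (i : Nat) =>
        [PySem.List.pyGetD tail (PySem.Int.mod ((j : Int) + ((i : Int) + 1)) (m : Int)) "",
         PySem.List.pyGetD tail ((j : Int) - ((i : Int) + 1)) ""]))
      ++ [[PySem.List.pyGetD nodelist 0 "", PySem.List.pyGetD nodelist ((j : Int) + 1) ""]])

-- ===== PRECONDITION & SPEC =====
-- Pre_ excludes only the empty list, on which Python A (and B alike) raise IndexError at nodelist[0].
def Pre_mpiPingpongGetGroups (nodelist : List String) : Prop := nodelist ≠ []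
instance (nodelist : List String) : Decidable (Pre_mpiPingpongGetGroups nodelist) := by unfold Pre_mpiPingpongGetGroups; infer_instance
def pvWitness_mpiPingpongGetGroups : List String := ["a", "b", "c"]

def Spec_mpiPingpongGetGroups (nodelist : List String) (out : List (List (List String))) : Prop := out = mpiPingpongGetGroups_alt nodelist
instance (nodelist : List String) (out : List (List (List String))) : Decidable (Spec_mpiPingpongGetGroups nodelist out) := by unfold Spec_mpiPingpongGetGroups; infer_instance

-- ===== CLAIM (what is proved, stated in full; the proofs are below) =====
def Claim_equal_mpiPingpongGetGroups : Prop := ∀ (nodelist : List String), Dom_mpiPingpongGetGroups nodelist → Pre_mpiPingpongGetGroups nodelist → Spec_mpiPingpongGetGroups nodelist (mpiPingpongGetGroups nodelist)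

-- ===== LEMMAS AND PROOFS =====

-- A's odd branch, rewritten in B's comprehension shape.
theorem mpiPingpongGetGroups_odd (l : List String) (h2 : 2 < l.length) (hodd : l.length % 2 = 1) :
    mpiPingpongGetGroups l =
      (List.range l.length).map (fun (j : Nat) =>
        (List.range (l.length / 2)).map (fun (i : Nat) =>
          [PySem.List.pyGetD l (PySem.Int.mod ((j : Int) + ((i : Int) + 1)) (l.length : Int)) "",
           PySem.List.pyGetD l ((j : Int) - ((i : Int) + 1)) ""])) := by
  rw [mpiPingpongGetGroups]
  rw [dif_neg (by omega), if_pos hodd]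
  simp only [PySem.List.foldl_append_singleton_eq_map, List.nil_append]
  rw [PySem.List.pyRange_zero_nat, PySem.List.pyRange_one]
  simp only [List.map_map]
  apply List.map_congr_left
  intro j _
  simp only [Function.comp_apply]
  have hx : ((((l.length / 2 : Nat) : Int) + 1) - 1).toNat = l.length / 2 := by omega
  rw [hx]
  apply List.map_congr_left
  intro i _
  simp only [Function.comp_apply]
  have h1 : (1 : Int) + (i : Int) = (i : Int) + 1 := by ring
  rw [h1]

-- The in-place "groups[i].append(...)" loop of A, run over the whole index range, is mapIdx.
theorem setloop_aux {b : Type} :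
    ∀ (idxs : List Nat) (c : Nat → List b) (y : List b) (xs : List (List b)),
      (idxs.map Nat.succ).foldl (fun cur k => cur.set k (cur.getD k [] ++ c k)) (y :: xs)
        = y :: idxs.foldl (fun cur k => cur.set k (cur.getD k [] ++ c (k + 1))) xs := by
  intro idxs
  induction idxs with
  | nil => intro c y xs; rfl
  | cons a t ih =>
    intro c y xs
    simp only [List.map_cons, List.foldl_cons, Nat.succ_eq_add_one, List.set_cons_succ,
      List.getD_cons_succ]
    exact ih c y _

theorem setloop_append {b : Type} :
    ∀ (gs : List (List b)) (c : Nat → List b),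
      (List.range gs.length).foldl (fun cur k => cur.set k (cur.getD k [] ++ c k)) gs
        = gs.mapIdx (fun k v => v ++ c k) := by
  intro gs
  induction gs with
  | nil => intro c; rfl
  | cons y xs ih =>
    intro c
    rw [List.length_cons, List.range_succ_eq_map, List.foldl_cons]
    simp only [List.getD_cons_zero, List.set_cons_zero]
    rw [setloop_aux (List.range xs.length) c (y ++ c 0) xs, ih, List.mapIdx_cons]

theorem mapIdx_map_range {b c : Type} (g : Nat → b → c) (F : Nat → b) (m : Nat) :
    List.mapIdx g ((List.range m).map F) = (List.range m).map (fun j => g j (F j)) := by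
  apply List.ext_getElem <;> simp [List.getElem_mapIdx]

-- ===== VERDICT (by name: the statement is the Claim_ definition above) =====
theorem mpiPingpongGetGroups_spec : Claim_equal_mpiPingpongGetGroups := by
  unfold Claim_equal_mpiPingpongGetGroups
  intro nodelist _ hpre
  unfold Spec_mpiPingpongGetGroups
  have hlen : 0 < nodelist.length := List.length_pos_of_ne_nil hpre
  by_cases h2 : nodelist.length ≤ 2
  · rw [mpiPingpongGetGroups, mpiPingpongGetGroups_alt]
    simp only [dif_pos h2, if_pos h2]
  · by_cases hodd : nodelist.length % 2 = 1
    · rw [mpiPingpongGetGroups_odd _ (by omega) hodd, mpiPingpongGetGroups_alt]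
      simp only [if_neg h2, if_pos hodd]
    · -- even case: unfold A once, rewrite the recursive call on the tail with the odd lemma
      rw [mpiPingpongGetGroups, mpiPingpongGetGroups_alt]
      simp only [dif_neg h2, if_neg h2, if_neg hodd, PySem.List.slice_from_one]
      have htl : nodelist.tail.length = nodelist.length - 1 := List.length_tail
      rw [mpiPingpongGetGroups_odd nodelist.tail (by omega) (by omega)]
      rw [PySem.List.pyRange_zero_nat, List.foldl_map]
      simp only [PySem.List.pySetD_natCast, PySem.List.pyGetD_natCast]
      rw [setloop_append, mapIdx_map_range]
      rw [htl]
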